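-- pv_equiv track=rewrite | github.com/PatrickGlaubers/Primeiro-trabalho-de-IA | trabalho-de-ia.py | eh_estado_meta
-- ===== SOURCE A (Python) =====
-- def eh_estado_meta(estado, n):
--     encontrou_azul = False
--     for bloco in estado:
--         if bloco == 'A':
--             encontrou_azul = True
--         elif bloco == 'B' and encontrou_azul:
--             return False
--     return True
-- ===== SOURCE B (Python) =====
-- def eh_estado_meta(estado, n):
--     if 'A' not in estado:
--         return True
--     i = estado.index('A')
--     return 'B' not in estado[i+1:]
-- ===== Notes on version B (the rewrite author's own statement) =====
-- stated objective: simpler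
-- what changed: Replaces the stateful flag-carrying loop with first index lookup of 'A' plus one membership test for 'B' on the suffix after it.
import Mathlib
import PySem

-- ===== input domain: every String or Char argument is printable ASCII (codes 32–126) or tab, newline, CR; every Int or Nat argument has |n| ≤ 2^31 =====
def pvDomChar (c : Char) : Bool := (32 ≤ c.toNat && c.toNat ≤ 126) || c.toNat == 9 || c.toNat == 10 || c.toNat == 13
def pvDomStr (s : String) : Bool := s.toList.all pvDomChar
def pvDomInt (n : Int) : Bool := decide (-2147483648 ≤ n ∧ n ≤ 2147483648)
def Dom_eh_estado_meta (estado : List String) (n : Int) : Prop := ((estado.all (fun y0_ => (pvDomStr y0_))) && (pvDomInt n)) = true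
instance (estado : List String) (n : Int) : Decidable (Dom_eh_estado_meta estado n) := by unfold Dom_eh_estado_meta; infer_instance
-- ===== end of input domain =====

-- B replaces A's stateful flag-carrying loop by index('A') plus one membership test on the suffix (simpler).

-- ===== PORT A =====
-- the for-loop with its 'encontrou_azul' flag, step for step
def ehLoopA : List String → Bool → Bool
  | [], _ => true
  | bloco :: rest, encontrou_azul =>
    if bloco = "A" then ehLoopA rest true
    else if bloco = "B" ∧ encontrou_azul then false
    else ehLoopA rest encontrou_azul

def eh_estado_meta (estado : List String) (n : Int) : Bool :=
  ehLoopA estado false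

-- ===== PORT B =====
def eh_estado_meta_alt (estado : List String) (n : Int) : Bool :=
  if "A" ∈ estado then
    match PySem.List.index? estado "A" with
    | some i => !(decide ("B" ∈ PySem.List.slice estado (some ((i : Int) + 1)) none))
    | none => true          -- unreachable: "A" ∈ estado
  else true

-- ===== PRECONDITION & SPEC =====
def Spec_eh_estado_meta (estado : List String) (n : Int) (out : Bool) : Prop := out = eh_estado_meta_alt estado n
instance (estado : List String) (n : Int) (out : Bool) : Decidable (Spec_eh_estado_meta estado n out) := by unfold Spec_eh_estado_meta; infer_instance

-- ===== CLAIM (what is proved, stated in full; the proofs are below) =====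
def Claim_equal_eh_estado_meta : Prop := ∀ (estado : List String) (n : Int), Dom_eh_estado_meta estado n → Spec_eh_estado_meta estado n (eh_estado_meta estado n)

-- ===== LEMMAS AND PROOFS =====

-- With the flag already set, A's loop returns false exactly when some "B" remains.
theorem ehLoopA_true (xs : List String) : ehLoopA xs true = !(decide ("B" ∈ xs)) := by
  induction xs with
  | nil => simp [ehLoopA]
  | cons x xs ih =>
    by_cases hA : x = "A"
    · subst hA; simp [ehLoopA, ih]
    · by_cases hB : x = "B"
      · subst hB; simp [ehLoopA]
      · have hB' : ¬ "B" = x := fun hc => hB hc.symm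
        simp [ehLoopA, hA, hB, hB', ih]

-- Characterisation of A's loop from the unset flag via the first index of "A".
theorem ehLoopA_false (xs : List String) :
    ehLoopA xs false =
      match PySem.List.index? xs "A" with
      | some i => !(decide ("B" ∈ xs.drop (i + 1)))
      | none => true := by
  induction xs with
  | nil => simp [ehLoopA, PySem.List.index?]
  | cons x xs ih =>
    by_cases hA : x = "A"
    · subst hA
      rw [PySem.List.index?_cons_self]
      simpa [ehLoopA] using ehLoopA_true xs
    · rw [PySem.List.index?_cons_of_ne xs hA]
      cases h : PySem.List.index? xs "A" with
      | none =>
        rw [h] at ih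
        by_cases hB : x = "B" <;> simp [ehLoopA, hA, hB, ih]
      | some i =>
        rw [h] at ih
        by_cases hB : x = "B" <;> simp [ehLoopA, hA, hB, ih, List.drop_succ_cons]

-- ===== VERDICT (by name: the statement is the Claim_ definition above) =====
theorem eh_estado_meta_spec : Claim_equal_eh_estado_meta := by
  intro estado n _
  unfold Spec_eh_estado_meta eh_estado_meta eh_estado_meta_alt
  rw [ehLoopA_false]
  by_cases hmem : "A" ∈ estado
  · rw [if_pos hmem]
    cases h : PySem.List.index? estado "A" with
    | none =>
      exact absurd ((PySem.List.index?_eq_none_iff estado "A").mp h) (by simp [hmem])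
    | some i =>
      show (!decide ("B" ∈ estado.drop (i + 1)))
          = !decide ("B" ∈ PySem.List.slice estado (some ((i : Int) + 1)) none)
      have hc : ((i : Int) + 1) = ((i + 1 : Nat) : Int) := by push_cast; ring
      rw [hc, PySem.List.slice_from_natCast]
  · have h : PySem.List.index? estado "A" = none := (PySem.List.index?_eq_none_iff estado "A").mpr hmem
    rw [h, if_neg hmem]
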